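-- pv_equiv track=rewrite | github.com/Deep-Axe/Practise | GoldmanSachsHackathonFinalWalk.py | is_valid_edge
-- ===== SOURCE A (Python) =====
-- def is_valid_edge(graph, u, v):
--     if len(graph[u]) == 1:
--         return True
--
--     def dfs_count(node, visited):
--         visited.add(node)
--         count = 1
--         for neighbor in graph[node]:
--             if neighbor not in visited:
--                 count += dfs_count(neighbor, visited)
--         return count
--
--     visited_before = set()
--     count_before = dfs_count(u, visited_before)
--
--     graph[u].remove(v)
--     graph[v].remove(u)
--
--     visited_after = set()
--     count_after = dfs_count(u, visited_after)
--
--     graph[u].append(v)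
--     graph[v].append(u)
--
--     return count_before == count_after
-- ===== SOURCE B (Python) =====
-- def is_valid_edge(graph, u, v):
--     if len(graph[u]) == 1:
--         return True
--
--     def reach_count(g):
--         # round-based saturation: expand the reachable set by one neighbor layer
--         # per round; len(g) rounds always suffice to hit the fixpoint
--         visited = {u}
--         for _ in range(len(g)):
--             new = set()
--             for node in visited:
--                 for nb in g[node]:
--                     if nb not in visited:
--                         new.add(nb)
--             if not new:
--                 break
--             visited |= new
--         return len(visited)
--
--     count_before = reach_count(graph)
--     g2 = {k: list(ns) for k, ns in graph.items()}
--     g2[u].remove(v)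
--     g2[v].remove(u)
--     count_after = reach_count(g2)
--     return count_before == count_after
-- ===== Notes on version B (the rewrite author's own statement) =====
-- stated objective: alternative
-- what changed: The recursive DFS counter (mutating the graph and threading a visited set through nested recursion) is replaced by a round-based frontier saturation: starting from {u}, repeatedly add the whole next neighbor layer until a fixpoint (at most len(g) rounds), and compare the two fixpoint sizes; the graph is copied instead of mutated and restored.
-- outside the precondition, e.g. on is_valid_edge({0: [1, 1], 1: [0, 0], 2: [99]}, 0, 1): A returns True, B returns True; on is_valid_edge({0: [2, 2], 2: [0, 0], 3: [3, 7]}, 0, 2): A returns True, B returns True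
import Mathlib
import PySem

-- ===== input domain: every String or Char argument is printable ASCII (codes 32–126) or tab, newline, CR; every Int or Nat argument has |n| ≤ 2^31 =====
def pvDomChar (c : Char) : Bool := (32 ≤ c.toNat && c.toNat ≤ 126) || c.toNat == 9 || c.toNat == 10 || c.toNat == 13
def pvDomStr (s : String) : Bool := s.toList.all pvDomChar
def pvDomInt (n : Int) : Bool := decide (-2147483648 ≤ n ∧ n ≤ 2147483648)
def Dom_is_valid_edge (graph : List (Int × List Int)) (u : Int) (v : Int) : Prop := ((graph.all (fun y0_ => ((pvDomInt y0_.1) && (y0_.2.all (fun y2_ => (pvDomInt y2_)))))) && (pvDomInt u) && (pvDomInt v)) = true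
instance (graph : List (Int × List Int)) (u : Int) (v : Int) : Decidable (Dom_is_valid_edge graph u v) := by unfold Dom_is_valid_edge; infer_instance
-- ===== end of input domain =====

-- B replaces A's recursive DFS count by round-based newFrontier saturation (alternative
-- decomposition, no speed claim). A temporarily mutates the caller's dict (remove then
-- re-append, which moves the edge entries to the ends of their lists); B copies instead;
-- the equivalence proved here is about the RETURN value only.

-- shared primitives for the dict[int, list[int]] model (first-match association list)
def nbrs : List (Int × List Int) → Int → List Int
  | [], _ => []
  | (k, ns) :: rest, x => if k = x then ns else nbrs rest x

-- list.remove(v): drops the first occurrence; ValueError (none) is excluded by Pre_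
def removeFirst (xs : List Int) (x : Int) : List Int :=
  (PySem.List.remove? xs x).getD xs

-- graph[k] = f(graph[k]) on the first entry with key k (the only one under Pre_'s Nodup)
def modFirst : List (Int × List Int) → Int → (List Int → List Int) → List (Int × List Int)
  | [], _, _ => []
  | (k', ns) :: rest, k, f =>
      if k' = k then (k', f ns) :: rest else (k', ns) :: modFirst rest k f

-- graph[u].remove(v); graph[v].remove(u)  (performed by both Pythons in this order)
def removeEdge (g : List (Int × List Int)) (u v : Int) : List (Int × List Int) :=
  modFirst (modFirst g u (fun ns => removeFirst ns v)) v (fun ns => removeFirst ns u)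

-- ===== PORT A =====
-- dfs_count: returns (count, visited); fuel only makes the recursion structural — with the
-- fuel used below it never runs out on inputs satisfying Pre_ (proved in dfsCount_spec)
def dfsCount (g : List (Int × List Int)) : Nat → Int → PySem.Set Int → Int × PySem.Set Int
  | 0, _, visited => (0, visited)
  | fuel+1, node, visited =>
      (nbrs g node).foldl
        (fun acc neighbor =>
          if neighbor ∈ acc.2 then acc
          else
            let r := dfsCount g fuel neighbor acc.2
            (acc.1 + r.1, r.2))
        (1, PySem.Set.add visited node)

def is_valid_edge (graph : List (Int × List Int)) (u : Int) (v : Int) : Bool :=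
  if (nbrs graph u).length = 1 then true
  else
    let count_before := (dfsCount graph (graph.length + 1) u PySem.Set.empty).1
    let g2 := removeEdge graph u v
    let count_after := (dfsCount g2 (graph.length + 1) u PySem.Set.empty).1
    -- the Python then re-appends v to graph[u] and u to graph[v]: this restores the
    -- caller's dict and does not affect the returned value
    count_before == count_after

-- ===== PORT B =====
-- one saturation round: the set of yet-unvisited neighbors of visited nodes
def newFrontier (g : List (Int × List Int)) (visited : PySem.Set Int) : PySem.Set Int :=
  visited.foldl
    (fun new node =>
      (nbrs g node).foldl
        (fun new nb => if nb ∈ visited then new else PySem.Set.add new nb) new)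
    PySem.Set.empty

def saturate (g : List (Int × List Int)) : Nat → PySem.Set Int → PySem.Set Int
  | 0, visited => visited
  | n+1, visited =>
      let new := newFrontier g visited
      if new.isEmpty then visited else saturate g n (PySem.Set.union visited new)

def is_valid_edge_alt (graph : List (Int × List Int)) (u : Int) (v : Int) : Bool :=
  if (nbrs graph u).length = 1 then true
  else
    let count_before := PySem.Set.len (saturate graph graph.length (PySem.Set.ofList [u]))
    let g2 := removeEdge graph u v
    let count_after := PySem.Set.len (saturate g2 g2.length (PySem.Set.ofList [u]))
    count_before == count_after

-- ===== PRECONDITION & SPEC =====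
-- Pre_ excludes: association lists with duplicate keys (they do not represent a Python
-- dict, whose construction collapses them); inputs where A raises KeyError/ValueError
-- (u or v not a key, the u-v edge absent in either list); and — slightly narrower than
-- A's raising domain — it asks ALL listed neighbours to be keys, while A only
-- dereferences neighbours reachable from u (A still returns on the cited inputs).
def Pre_is_valid_edge (graph : List (Int × List Int)) (u : Int) (v : Int) : Prop :=
  (graph.map Prod.fst).Nodup ∧ u ∈ graph.map Prod.fst ∧
  ((∃ p ∈ graph, p.1 = u ∧ p.2.length = 1) ∨
    (v ∈ graph.map Prod.fst ∧
     (∀ p ∈ graph, ∀ n ∈ p.2, n ∈ graph.map Prod.fst) ∧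
     (if u = v then ∃ p ∈ graph, p.1 = u ∧ 2 ≤ p.2.count v
      else (∃ p ∈ graph, p.1 = u ∧ v ∈ p.2) ∧ (∃ p ∈ graph, p.1 = v ∧ u ∈ p.2))))

instance (graph : List (Int × List Int)) (u : Int) (v : Int) : Decidable (Pre_is_valid_edge graph u v) := by
  unfold Pre_is_valid_edge; infer_instance

def pvWitness_is_valid_edge : (List (Int × List Int)) × Int × Int :=
  ([(0, [1, 2]), (1, [0, 2]), (2, [0, 1])], 0, 1)

def Spec_is_valid_edge (graph : List (Int × List Int)) (u : Int) (v : Int) (out : Bool) : Prop := out = is_valid_edge_alt graph u v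
instance (graph : List (Int × List Int)) (u : Int) (v : Int) (out : Bool) : Decidable (Spec_is_valid_edge graph u v out) := by unfold Spec_is_valid_edge; infer_instance

-- ===== CLAIM (what is proved, stated in full; the proofs are below) =====
def Claim_equal_is_valid_edge : Prop := ∀ (graph : List (Int × List Int)) (u : Int) (v : Int), Dom_is_valid_edge graph u v → Pre_is_valid_edge graph u v → Spec_is_valid_edge graph u v (is_valid_edge graph u v)

-- ===== LEMMAS AND PROOFS =====

def gKeys (g : List (Int × List Int)) : List Int := g.map Prod.fst

-- S is closed under taking neighbours
def Closed (g : List (Int × List Int)) (S : List Int) : Prop :=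
  ∀ x ∈ S, ∀ nb ∈ nbrs g x, nb ∈ S

-- every listed neighbour is itself a key (Pre_'s closure condition)
def GoodG (g : List (Int × List Int)) : Prop :=
  ∀ p ∈ g, ∀ n ∈ p.2, n ∈ gKeys g

theorem nbrs_entry (g : List (Int × List Int)) (x : Int) :
    (x, nbrs g x) ∈ g ∨ nbrs g x = [] := by
  induction g with
  | nil => exact Or.inr rfl
  | cons p rest ih =>
    obtain ⟨k, ns⟩ := p
    simp only [nbrs]
    split
    · next h => subst h; exact Or.inl (by simp)
    · rcases ih with hm | he
      · exact Or.inl (List.mem_cons_of_mem _ hm)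
      · exact Or.inr he

theorem nbrs_subset_keys {g : List (Int × List Int)} (hg : GoodG g) (x : Int) :
    ∀ n ∈ nbrs g x, n ∈ gKeys g := by
  intro n hn
  rcases nbrs_entry g x with hm | he
  · exact hg _ hm n hn
  · rw [he] at hn; cases hn

-- ---- A-side: characterisation of the recursive DFS ----

def DfsSpec (g : List (Int × List Int)) (fuel : Nat) : Prop :=
  ∀ (node : Int) (visited : PySem.Set Int),
    node ∈ gKeys g → node ∉ visited → visited.Nodup → (∀ x ∈ visited, x ∈ gKeys g) →
    ((gKeys g).toFinset \ visited.toFinset).card < fuel →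
    visited ⊆ (dfsCount g fuel node visited).2 ∧
    node ∈ (dfsCount g fuel node visited).2 ∧
    (dfsCount g fuel node visited).2.Nodup ∧
    (∀ x ∈ (dfsCount g fuel node visited).2, x ∈ gKeys g) ∧
    (dfsCount g fuel node visited).1 =
      ((dfsCount g fuel node visited).2.length : Int) - visited.length ∧
    (∀ x ∈ (dfsCount g fuel node visited).2, x ∉ visited →
      ∀ nb ∈ nbrs g x, nb ∈ (dfsCount g fuel node visited).2) ∧
    (∀ S : List Int, Closed g S → (∀ x ∈ visited, x ∈ S) → node ∈ S →
      ∀ x ∈ (dfsCount g fuel node visited).2, x ∈ S)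

theorem dfsFold_spec (g : List (Int × List Int)) (fuel : Nat)
    (IH : DfsSpec g fuel) :
    ∀ (ns : List Int) (acc : Int × PySem.Set Int),
      (∀ n ∈ ns, n ∈ gKeys g) → acc.2.Nodup → (∀ x ∈ acc.2, x ∈ gKeys g) →
      ((gKeys g).toFinset \ acc.2.toFinset).card < fuel →
      (acc.2 ⊆ (ns.foldl (fun acc neighbor => if neighbor ∈ acc.2 then acc else
          let r := dfsCount g fuel neighbor acc.2
          (acc.1 + r.1, r.2)) acc).2) ∧
      ((ns.foldl (fun acc neighbor => if neighbor ∈ acc.2 then acc else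
          let r := dfsCount g fuel neighbor acc.2
          (acc.1 + r.1, r.2)) acc).2.Nodup) ∧
      (∀ x ∈ (ns.foldl (fun acc neighbor => if neighbor ∈ acc.2 then acc else
          let r := dfsCount g fuel neighbor acc.2
          (acc.1 + r.1, r.2)) acc).2, x ∈ gKeys g) ∧
      (((gKeys g).toFinset \ (ns.foldl (fun acc neighbor => if neighbor ∈ acc.2 then acc else
          let r := dfsCount g fuel neighbor acc.2
          (acc.1 + r.1, r.2)) acc).2.toFinset).card < fuel) ∧
      ((ns.foldl (fun acc neighbor => if neighbor ∈ acc.2 then acc else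
          let r := dfsCount g fuel neighbor acc.2
          (acc.1 + r.1, r.2)) acc).1 - acc.1 =
        (((ns.foldl (fun acc neighbor => if neighbor ∈ acc.2 then acc else
          let r := dfsCount g fuel neighbor acc.2
          (acc.1 + r.1, r.2)) acc).2.length : Int)) - acc.2.length) ∧
      (∀ n ∈ ns, n ∈ (ns.foldl (fun acc neighbor => if neighbor ∈ acc.2 then acc else
          let r := dfsCount g fuel neighbor acc.2
          (acc.1 + r.1, r.2)) acc).2) ∧
      (∀ x ∈ (ns.foldl (fun acc neighbor => if neighbor ∈ acc.2 then acc else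
          let r := dfsCount g fuel neighbor acc.2
          (acc.1 + r.1, r.2)) acc).2, x ∉ acc.2 →
        ∀ nb ∈ nbrs g x, nb ∈ (ns.foldl (fun acc neighbor => if neighbor ∈ acc.2 then acc else
          let r := dfsCount g fuel neighbor acc.2
          (acc.1 + r.1, r.2)) acc).2) ∧
      (∀ S : List Int, Closed g S → (∀ x ∈ acc.2, x ∈ S) → (∀ n ∈ ns, n ∈ S) →
        ∀ x ∈ (ns.foldl (fun acc neighbor => if neighbor ∈ acc.2 then acc else
          let r := dfsCount g fuel neighbor acc.2
          (acc.1 + r.1, r.2)) acc).2, x ∈ S) := by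
  intro ns
  induction ns with
  | nil =>
    intro acc _ hnd hkeys hcard
    simp only [List.foldl_nil]
    refine ⟨fun _ h => h, hnd, hkeys, hcard, by omega, ?_, ?_, ?_⟩
    · intro n h; cases h
    · intro x hx hx2 nb _; exact absurd hx hx2
    · exact fun _ _ hacc _ x hx => hacc x hx
  | cons n rest ih =>
    intro acc hns hnd hkeys hcard
    simp only [List.foldl_cons]
    by_cases hmem : n ∈ acc.2
    · rw [if_pos hmem]
      obtain ⟨m1, m2, m3, m4, m5, m6, m7, m8⟩ :=
        ih acc (fun x hx => hns x (List.mem_cons_of_mem _ hx)) hnd hkeys hcard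
      refine ⟨m1, m2, m3, m4, m5, ?_, m7, ?_⟩
      · intro x hx
        rcases List.mem_cons.1 hx with rfl | hx
        · exact m1 hmem
        · exact m6 x hx
      · intro S hS haccS hnsS
        exact m8 S hS haccS (fun x hx => hnsS x (List.mem_cons_of_mem _ hx))
    · rw [if_neg hmem]
      obtain ⟨r1, r2, r3, r4, r5, r6, r7⟩ :=
        IH n acc.2 (hns n (by simp)) hmem hnd hkeys hcard
      set r := dfsCount g fuel n acc.2 with hr
      have hrcard : ((gKeys g).toFinset \ r.2.toFinset).card < fuel := by
        refine lt_of_le_of_lt (Finset.card_le_card ?_) hcard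
        refine Finset.sdiff_subset_sdiff (Finset.Subset.refl _) ?_
        intro k hk
        exact List.mem_toFinset.2 (r1 (List.mem_toFinset.1 hk))
      obtain ⟨m1, m2, m3, m4, m5, m6, m7, m8⟩ :=
        ih (acc.1 + r.1, r.2) (fun x hx => hns x (List.mem_cons_of_mem _ hx)) r3 r4 hrcard
      simp only at m1 m5
      refine ⟨fun x hx => m1 (r1 hx), m2, m3, m4, ?_, ?_, ?_, ?_⟩
      · omega
      · intro x hx
        rcases List.mem_cons.1 hx with rfl | hx
        · exact m1 r2
        · exact m6 x hx
      · intro x hx hxacc nb hnb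
        by_cases hxr : x ∈ r.2
        · exact m1 (r6 x hxr hxacc nb hnb)
        · exact m7 x hx hxr nb hnb
      · intro S hS haccS hnsS
        refine m8 S hS ?_ (fun x hx => hnsS x (List.mem_cons_of_mem _ hx))
        exact r7 S hS haccS (hnsS n (by simp))

theorem dfsCount_spec (g : List (Int × List Int)) (hg : GoodG g) :
    ∀ (fuel : Nat), DfsSpec g fuel := by
  intro fuel
  induction fuel with
  | zero =>
    intro node visited _ _ _ _ hcard
    exact absurd hcard (Nat.not_lt_zero _)
  | succ fuel ih =>
    intro node visited hnode hnot hnd hkeys hcard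
    have hdef : dfsCount g (fuel + 1) node visited =
        (nbrs g node).foldl (fun acc neighbor => if neighbor ∈ acc.2 then acc else
          let r := dfsCount g fuel neighbor acc.2
          (acc.1 + r.1, r.2)) (1, PySem.Set.add visited node) := rfl
    have hadd : PySem.Set.add visited node = visited ++ [node] :=
      PySem.Set.add_of_not_mem hnot
    have hv1nd : (PySem.Set.add visited node).Nodup := PySem.Set.nodup_add _ _ hnd
    have hv1keys : ∀ x ∈ PySem.Set.add visited node, x ∈ gKeys g := by
      intro x hx
      rcases (PySem.Set.mem_add _ _ x).1 hx with h | rfl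
      · exact hkeys x h
      · exact hnode
    have hnodein : node ∈ PySem.Set.add visited node :=
      (PySem.Set.mem_add _ _ node).2 (Or.inr rfl)
    have hv1card : ((gKeys g).toFinset \ (PySem.Set.add visited node).toFinset).card < fuel := by
      have hy1 : node ∈ (gKeys g).toFinset \ visited.toFinset := by
        simp [List.mem_toFinset, hnode, hnot]
      have hsub : (gKeys g).toFinset \ (PySem.Set.add visited node).toFinset ⊆
          ((gKeys g).toFinset \ visited.toFinset).erase node := by
        intro k hk
        simp only [Finset.mem_sdiff, List.mem_toFinset, Finset.mem_erase] at hk ⊢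
        refine ⟨?_, hk.1, fun hkv => hk.2 ((PySem.Set.mem_add _ _ k).2 (Or.inl hkv))⟩
        rintro rfl
        exact hk.2 hnodein
      have h1 := Finset.card_le_card hsub
      rw [Finset.card_erase_of_mem hy1] at h1
      have h2 : 1 ≤ ((gKeys g).toFinset \ visited.toFinset).card :=
        Finset.card_pos.2 ⟨node, hy1⟩
      omega
    obtain ⟨m1, m2, m3, m4, m5, m6, m7, m8⟩ :=
      dfsFold_spec g fuel ih (nbrs g node) (1, PySem.Set.add visited node)
        (nbrs_subset_keys hg node) hv1nd hv1keys hv1card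
    rw [hdef]
    simp only at m1 m5 ⊢
    have hsubv : visited ⊆ PySem.Set.add visited node := by
      intro x hx; exact (PySem.Set.mem_add _ _ x).2 (Or.inl hx)
    have hv1len : (PySem.Set.add visited node).length = visited.length + 1 := by
      rw [hadd]; simp
    refine ⟨fun x hx => m1 (hsubv hx), m1 hnodein, m2, m3, ?_, ?_, ?_⟩
    · rw [hv1len] at m5; push_cast at m5 ⊢; omega
    · intro x hx hxvis nb hnb
      by_cases hxn : x = node
      · subst hxn; exact m6 nb hnb
      · have hxv1 : x ∉ PySem.Set.add visited node := by
          rw [PySem.Set.mem_add]; rintro (h | h) <;> [exact hxvis h; exact hxn h]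
        exact m7 x hx hxv1 nb hnb
    · intro S hS hvisS hnodeS
      refine m8 S hS ?_ (hS node hnodeS)
      intro x hx
      rcases (PySem.Set.mem_add _ _ x).1 hx with h | rfl
      · exact hvisS x h
      · exact hnodeS

-- ---- B-side: characterisation of the saturation loop ----

theorem mem_innerFold (vis : PySem.Set Int) (ns : List Int) :
    ∀ (new : PySem.Set Int) (y : Int),
      y ∈ ns.foldl (fun new nb => if nb ∈ vis then new else PySem.Set.add new nb) new ↔
        y ∈ new ∨ (y ∈ ns ∧ y ∉ vis) := by
  induction ns with
  | nil => simp
  | cons n rest ih =>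
    intro new y
    simp only [List.foldl_cons]
    by_cases h : n ∈ vis
    · rw [if_pos h, ih]
      constructor
      · rintro (h1 | h1)
        · exact Or.inl h1
        · exact Or.inr ⟨List.mem_cons_of_mem _ h1.1, h1.2⟩
      · rintro (h1 | ⟨h1, h2⟩)
        · exact Or.inl h1
        · rcases List.mem_cons.1 h1 with rfl | h1
          · exact absurd h h2
          · exact Or.inr ⟨h1, h2⟩
    · rw [if_neg h, ih]
      simp only [PySem.Set.mem_add, List.mem_cons]
      constructor
      · rintro ((h1 | rfl) | h1)
        · exact Or.inl h1
        · exact Or.inr ⟨Or.inl rfl, h⟩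
        · exact Or.inr ⟨Or.inr h1.1, h1.2⟩
      · rintro (h1 | ⟨rfl | h1, h2⟩)
        · exact Or.inl (Or.inl h1)
        · exact Or.inl (Or.inr rfl)
        · exact Or.inr ⟨h1, h2⟩

theorem mem_frontier (g : List (Int × List Int)) (vis : PySem.Set Int) (y : Int) :
    y ∈ newFrontier g vis ↔ y ∉ vis ∧ ∃ x ∈ vis, y ∈ nbrs g x := by
  have outer : ∀ (xs : List Int) (s : PySem.Set Int),
      y ∈ xs.foldl (fun new node => (nbrs g node).foldl
          (fun new nb => if nb ∈ vis then new else PySem.Set.add new nb) new) s ↔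
        y ∈ s ∨ ∃ x ∈ xs, y ∈ nbrs g x ∧ y ∉ vis := by
    intro xs
    induction xs with
    | nil => simp
    | cons x rest ih =>
      intro s
      simp only [List.foldl_cons]
      rw [ih, mem_innerFold]
      constructor
      · rintro ((h1 | h1) | ⟨x', hx', h1⟩)
        · exact Or.inl h1
        · exact Or.inr ⟨x, by simp, h1.1, h1.2⟩
        · exact Or.inr ⟨x', List.mem_cons_of_mem _ hx', h1⟩
      · rintro (h1 | ⟨x', hx', h1, h2⟩)
        · exact Or.inl (Or.inl h1)
        · rcases List.mem_cons.1 hx' with rfl | hx'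
          · exact Or.inl (Or.inr ⟨h1, h2⟩)
          · exact Or.inr ⟨x', hx', h1, h2⟩
  unfold newFrontier
  rw [outer]
  simp only [PySem.Set.empty, List.not_mem_nil, false_or]
  constructor
  · rintro ⟨x, hx, h1, h2⟩; exact ⟨h2, x, hx, h1⟩
  · rintro ⟨h2, x, hx, h1⟩; exact ⟨x, hx, h1, h2⟩

theorem saturate_mono (g : List (Int × List Int)) :
    ∀ (n : Nat) (vis : PySem.Set Int), vis ⊆ saturate g n vis := by
  intro n
  induction n with
  | zero => intro vis; exact fun _ h => h
  | succ n ih =>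
    intro vis
    simp only [saturate]
    split
    · exact fun _ h => h
    · intro x hx
      exact ih _ ((PySem.Set.mem_union _ _ x).2 (Or.inl hx))

theorem saturate_sound (g : List (Int × List Int)) :
    ∀ (n : Nat) (vis : PySem.Set Int) (S : List Int), Closed g S → (∀ x ∈ vis, x ∈ S) →
      ∀ x ∈ saturate g n vis, x ∈ S := by
  intro n
  induction n with
  | zero => intro vis S _ hvis x hx; exact hvis x hx
  | succ n ih =>
    intro vis S hS hvis
    simp only [saturate]
    split
    · exact hvis
    · refine ih _ S hS ?_
      intro x hx
      rcases (PySem.Set.mem_union _ _ x).1 hx with h | h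
      · exact hvis x h
      · obtain ⟨_, x', hx', hnb⟩ := (mem_frontier g vis x).1 h
        exact hS x' (hvis x' hx') x hnb

theorem saturate_nodup (g : List (Int × List Int)) :
    ∀ (n : Nat) (vis : PySem.Set Int), vis.Nodup → (saturate g n vis).Nodup := by
  intro n
  induction n with
  | zero => intro vis h; exact h
  | succ n ih =>
    intro vis h
    simp only [saturate]
    split
    · exact h
    · exact ih _ (PySem.Set.nodup_union _ _ h)

theorem saturate_closed (g : List (Int × List Int)) (hg : GoodG g) :
    ∀ (n : Nat) (vis : PySem.Set Int), (∀ x ∈ vis, x ∈ gKeys g) →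
      ((gKeys g).toFinset \ vis.toFinset).card ≤ n →
      Closed g (saturate g n vis) := by
  intro n
  induction n with
  | zero =>
    intro vis hvis hcard
    have hsub : (gKeys g).toFinset ⊆ vis.toFinset := by
      rw [← Finset.sdiff_eq_empty_iff_subset]
      exact Finset.card_eq_zero.1 (Nat.le_zero.1 hcard)
    intro x hx nb hnb
    have : nb ∈ (gKeys g).toFinset := List.mem_toFinset.2 (nbrs_subset_keys hg x nb hnb)
    simpa [saturate] using List.mem_toFinset.1 (hsub this)
  | succ n ih =>
    intro vis hvis hcard
    simp only [saturate]
    split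
    · next hempty =>
      intro x hx nb hnb
      by_contra hnbv
      have : nb ∈ newFrontier g vis := (mem_frontier g vis nb).2 ⟨hnbv, x, hx, hnb⟩
      rw [List.isEmpty_iff.1 hempty] at this
      cases this
    · next hempty =>
      have hne : newFrontier g vis ≠ [] := fun h => hempty (by simp [h])
      obtain ⟨y, hy⟩ := List.exists_mem_of_ne_nil _ hne
      obtain ⟨hynv, x', hx', hynb⟩ := (mem_frontier g vis y).1 hy
      have hyk : y ∈ gKeys g := nbrs_subset_keys hg x' y hynb
      refine ih _ ?_ ?_
      · intro x hx
        rcases (PySem.Set.mem_union _ _ x).1 hx with h | h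
        · exact hvis x h
        · obtain ⟨_, x'', hx'', hnb⟩ := (mem_frontier g vis x).1 h
          exact nbrs_subset_keys hg x'' x hnb
      · have hy1 : y ∈ (gKeys g).toFinset \ vis.toFinset := by
          simp [List.mem_toFinset, hyk, hynv]
        have hsub : (gKeys g).toFinset \ (PySem.Set.union vis (newFrontier g vis)).toFinset ⊆
            ((gKeys g).toFinset \ vis.toFinset).erase y := by
          intro k hk
          simp only [Finset.mem_sdiff, List.mem_toFinset, Finset.mem_erase] at hk ⊢
          refine ⟨?_, hk.1, fun hkv => hk.2 ((PySem.Set.mem_union _ _ k).2 (Or.inl hkv))⟩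
          rintro rfl
          exact hk.2 ((PySem.Set.mem_union _ _ k).2 (Or.inr hy))
        have h1 := Finset.card_le_card hsub
        rw [Finset.card_erase_of_mem hy1] at h1
        have h2 : 1 ≤ ((gKeys g).toFinset \ vis.toFinset).card :=
          Finset.card_pos.2 ⟨y, hy1⟩
        omega

-- ---- the two counts agree on any graph with the closure property ----

theorem nbrs_of_mem {g : List (Int × List Int)} (hnd : (g.map Prod.fst).Nodup) :
    ∀ {k : Int} {ns : List Int}, (k, ns) ∈ g → nbrs g k = ns := by
  induction g with
  | nil => intro k ns h; cases h
  | cons p rest ih =>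
    obtain ⟨k', ns'⟩ := p
    intro k ns h
    simp only [List.map_cons, List.nodup_cons] at hnd
    rcases List.mem_cons.1 h with h | h
    · cases h; simp [nbrs]
    · have hne : k' ≠ k := by
        rintro rfl
        exact hnd.1 (List.mem_map.2 ⟨(k', ns), h, rfl⟩)
      simp only [nbrs, if_neg hne]
      exact ih hnd.2 h

theorem count_eq (g : List (Int × List Int)) (hg : GoodG g) (u : Int) (hu : u ∈ gKeys g) :
    (dfsCount g (g.length + 1) u PySem.Set.empty).1 =
      PySem.Set.len (saturate g g.length (PySem.Set.ofList [u])) := by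
  have hKcard : (gKeys g).toFinset.card ≤ g.length := by
    have h1 := List.toFinset_card_le (gKeys g)
    have h2 : (gKeys g).length = g.length := by simp [gKeys]
    omega
  have hcard0 : ((gKeys g).toFinset \ (PySem.Set.empty : PySem.Set Int).toFinset).card
      < g.length + 1 := by
    simp only [PySem.Set.empty, List.toFinset_nil, Finset.sdiff_empty]
    omega
  obtain ⟨a1, a2, a3, a4, a5, a6, a7⟩ :=
    dfsCount_spec g hg (g.length + 1) u PySem.Set.empty hu (by simp [PySem.Set.empty])
      (by simp [PySem.Set.empty]) (by simp [PySem.Set.empty]) hcard0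
  have hVAclosed : Closed g (dfsCount g (g.length + 1) u PySem.Set.empty).2 :=
    fun x hx => a6 x hx (by simp [PySem.Set.empty])
  have hofl : (PySem.Set.ofList [u] : PySem.Set Int) = [u] := rfl
  have hviskeys : ∀ x ∈ (PySem.Set.ofList [u] : PySem.Set Int), x ∈ gKeys g := by
    rw [hofl]; intro x hx; rcases List.mem_singleton.1 hx with rfl; exact hu
  have hviscard : ((gKeys g).toFinset \ (PySem.Set.ofList [u] : PySem.Set Int).toFinset).card
      ≤ g.length := le_trans (Finset.card_le_card (Finset.sdiff_subset)) hKcard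
  have hVBnodup : (saturate g g.length (PySem.Set.ofList [u])).Nodup :=
    saturate_nodup g g.length _ (by rw [hofl]; simp)
  have hVBclosed : Closed g (saturate g g.length (PySem.Set.ofList [u])) :=
    saturate_closed g hg g.length _ hviskeys hviscard
  have huVB : u ∈ saturate g g.length (PySem.Set.ofList [u]) :=
    saturate_mono g g.length _ (by rw [hofl]; simp)
  have hAB : ∀ x ∈ (dfsCount g (g.length + 1) u PySem.Set.empty).2,
      x ∈ saturate g g.length (PySem.Set.ofList [u]) :=
    a7 _ hVBclosed (by simp [PySem.Set.empty]) huVB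
  have hBA : ∀ x ∈ saturate g g.length (PySem.Set.ofList [u]),
      x ∈ (dfsCount g (g.length + 1) u PySem.Set.empty).2 :=
    saturate_sound g g.length _ _ hVAclosed
      (by rw [hofl]; intro x hx; rcases List.mem_singleton.1 hx with rfl; exact a2)
  have hperm : (dfsCount g (g.length + 1) u PySem.Set.empty).2.Perm
      (saturate g g.length (PySem.Set.ofList [u])) :=
    (List.perm_ext_iff_of_nodup a3 hVBnodup).2 (fun a => ⟨hAB a, hBA a⟩)
  have hlen := hperm.length_eq
  simp only [PySem.Set.len]
  rw [a5, hlen]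
  simp [PySem.Set.empty]

-- ---- removeEdge preserves the shape facts ----

theorem modFirst_map_fst (g : List (Int × List Int)) (k : Int) (f : List Int → List Int) :
    (modFirst g k f).map Prod.fst = g.map Prod.fst := by
  induction g with
  | nil => rfl
  | cons p rest ih =>
    obtain ⟨k', ns⟩ := p
    simp only [modFirst]
    split <;> simp [ih]

theorem mem_modFirst (g : List (Int × List Int)) (k : Int) (f : List Int → List Int) :
    ∀ p ∈ modFirst g k f, p ∈ g ∨ ∃ q ∈ g, p.1 = q.1 ∧ p.2 = f q.2 := by
  induction g with
  | nil => intro p hp; cases hp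
  | cons q rest ih =>
    obtain ⟨k', ns⟩ := q
    intro p hp
    simp only [modFirst] at hp
    split at hp
    · rcases List.mem_cons.1 hp with h | h
      · exact Or.inr ⟨(k', ns), by simp, by simp [h]⟩
      · exact Or.inl (List.mem_cons_of_mem _ h)
    · rcases List.mem_cons.1 hp with h | h
      · exact Or.inl (by simp [h])
      · rcases ih p h with h' | ⟨q, hq, h1, h2⟩
        · exact Or.inl (List.mem_cons_of_mem _ h')
        · exact Or.inr ⟨q, List.mem_cons_of_mem _ hq, h1, h2⟩

theorem removeFirst_subset (xs : List Int) (x : Int) : ∀ y ∈ removeFirst xs x, y ∈ xs := by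
  intro y hy
  unfold removeFirst at hy
  by_cases hx : x ∈ xs
  · rw [PySem.List.remove?_eq_some_erase xs x hx] at hy
    exact List.erase_subset (by simpa using hy)
  · rw [(PySem.List.remove?_eq_none_iff xs x).2 hx] at hy
    exact hy

theorem removeEdge_keys (g : List (Int × List Int)) (u v : Int) :
    gKeys (removeEdge g u v) = gKeys g := by
  unfold removeEdge gKeys
  rw [modFirst_map_fst, modFirst_map_fst]

theorem modFirst_good (g : List (Int × List Int)) (hg : GoodG g) (k x : Int) :
    GoodG (modFirst g k (fun ns => removeFirst ns x)) := by
  intro p hp n hn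
  have hkeys : gKeys (modFirst g k (fun ns => removeFirst ns x)) = gKeys g := by
    unfold gKeys; rw [modFirst_map_fst]
  rw [hkeys]
  rcases mem_modFirst g k _ p hp with h | ⟨q, hq, _, h2⟩
  · exact hg p h n hn
  · exact hg q hq n (removeFirst_subset _ _ n (h2 ▸ hn))

theorem removeEdge_good (g : List (Int × List Int)) (hg : GoodG g) (u v : Int) :
    GoodG (removeEdge g u v) := by
  exact modFirst_good _ (modFirst_good g hg u v) v u

theorem removeEdge_length (g : List (Int × List Int)) (u v : Int) :
    (removeEdge g u v).length = g.length := by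
  have h1 := congrArg List.length (removeEdge_keys g u v)
  simpa [gKeys] using h1

-- ===== VERDICT (by name: the statement is the Claim_ definition above) =====
theorem is_valid_edge_spec : Claim_equal_is_valid_edge := by
  intro graph u v _ hpre
  obtain ⟨hnd, huk, hdisj⟩ := hpre
  unfold Spec_is_valid_edge is_valid_edge is_valid_edge_alt
  by_cases hlen : (nbrs graph u).length = 1
  · rw [if_pos hlen, if_pos hlen]
  · rw [if_neg hlen, if_neg hlen]
    rcases hdisj with ⟨p, hp, hp1, hp2⟩ | ⟨_, hgood, _⟩
    · obtain ⟨k, ns⟩ := p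
      cases hp1
      exact absurd (by rw [nbrs_of_mem hnd hp]; exact hp2) hlen
    have hgood' : GoodG graph := hgood
    have hu : u ∈ gKeys graph := huk
    have h1 := count_eq graph hgood' u hu
    have hg2good := removeEdge_good graph hgood' u v
    have hu2 : u ∈ gKeys (removeEdge graph u v) := by rw [removeEdge_keys]; exact hu
    have h2 := count_eq (removeEdge graph u v) hg2good u hu2
    rw [removeEdge_length] at h2
    simp only [removeEdge_length, h1, h2]
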